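-- pv_equiv track=rewrite | github.com/G-ram/gv | gv/gv.py | fix_assignments
-- ===== SOURCE A (Python) =====
-- def fix_assignments(lines):
-- 	newlines = []
-- 	i = 0
-- 	while i < len(lines):
-- 		if 'else_body()' in lines[i] or 'if_body()' in lines[i]:
-- 			indent = lines[i].count('\t')
-- 			newlines.append(lines[i])
-- 			i += 1
-- 			start = i
-- 			for j, line in enumerate(lines[start:]):
-- 				if line.count('\t') <= indent and len(line.strip()) > 0:
-- 					break
-- 				if '#' in line:
-- 					newlines.append(line.replace('# ', ''))
-- 				else:
-- 					newlines.append(line)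
-- 				i += 1
-- 		else:
-- 			newlines.append(lines[i])
-- 			i += 1
--
-- 	return newlines
-- ===== SOURCE B (Python) =====
-- def fix_assignments(lines):
-- 	n = len(lines)
-- 	flags = [False] * n
-- 	for j in range(n):
-- 		lj = lines[j]
-- 		if 'else_body()' in lj or 'if_body()' in lj:
-- 			d = lj.count('\t')
-- 			k = j + 1
-- 			while k < n and (lines[k].count('\t') > d or not lines[k].strip()):
-- 				flags[k] = True
-- 				k += 1
-- 	return [l.replace('# ', '') if '#' in l and f else l
-- 	        for l, f in zip(lines, flags)]
-- ===== Notes on version B (the rewrite author's own statement) =====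
-- stated objective: alternative
-- what changed: A's consuming cursor scan (a nested inner loop eats each block as it is met, so nested triggers are inert) is replaced by a trigger-centric two-phase pass: every marker line independently marks the span it covers in a flag array, then a single map uncomments exactly the flagged lines.
import Mathlib
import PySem

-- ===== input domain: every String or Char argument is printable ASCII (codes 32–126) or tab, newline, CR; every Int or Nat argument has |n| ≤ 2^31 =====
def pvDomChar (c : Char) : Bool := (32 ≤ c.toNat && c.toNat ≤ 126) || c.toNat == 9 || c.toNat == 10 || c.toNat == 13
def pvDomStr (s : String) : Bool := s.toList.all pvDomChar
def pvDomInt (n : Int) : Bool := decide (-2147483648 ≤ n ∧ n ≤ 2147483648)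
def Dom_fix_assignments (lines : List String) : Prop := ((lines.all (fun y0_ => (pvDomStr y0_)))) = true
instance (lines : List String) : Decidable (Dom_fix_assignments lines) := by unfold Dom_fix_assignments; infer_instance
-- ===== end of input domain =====

-- B replaces A's consuming cursor scan (a nested loop eats each block; nested triggers are
-- inert) by a trigger-centric two-phase pass: every marker line marks the span it covers in a
-- flag array, then a single map uncomments exactly the flagged lines; objective: alternative.

-- ===== PORT A =====
-- inner 'for j, line in enumerate(lines[start:])' of A: returns (lines appended, remaining suffix)
def pvTakeBlockA (indent : Nat) : List String → List String × List String
  | [] => ([], [])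
  | l :: rest =>
    if PySem.Str.count l "\t" ≤ indent ∧ PySem.Str.len (PySem.Str.strip l) > 0 then
      ([], l :: rest)
    else
      ((if PySem.Str.isIn "#" l then PySem.Str.replace l "# " "" else l) :: (pvTakeBlockA indent rest).1,
       (pvTakeBlockA indent rest).2)

-- needed by the port's termination proof
theorem pvTakeBlockA_snd_le (indent : Nat) (ls : List String) :
    (pvTakeBlockA indent ls).2.length ≤ ls.length := by
  induction ls with
  | nil => simp [pvTakeBlockA]
  | cons l rest ih =>
    simp only [pvTakeBlockA]
    split
    · simp
    · simpa using Nat.le_succ_of_le ih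

-- outer 'while i < len(lines)' of A
def pvGoA : List String → List String
  | [] => []
  | l :: rest =>
    if PySem.Str.isIn "else_body()" l ∨ PySem.Str.isIn "if_body()" l then
      l :: ((pvTakeBlockA (PySem.Str.count l "\t") rest).1 ++
            pvGoA (pvTakeBlockA (PySem.Str.count l "\t") rest).2)
    else
      l :: pvGoA rest
termination_by ls => ls.length
decreasing_by
  · exact Nat.lt_succ_of_le (pvTakeBlockA_snd_le _ rest)
  · simp

def fix_assignments (lines : List String) : List String := pvGoA lines

-- ===== PORT B =====
def pvTrigB (l : String) : Bool :=
  PySem.Str.isIn "else_body()" l || PySem.Str.isIn "if_body()" l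

-- the while-condition body: lines[k].count('\t') > d or not lines[k].strip()
def pvContB (d : Nat) (l : String) : Bool :=
  decide (d < PySem.Str.count l "\t") || decide (PySem.Str.strip l = "")

-- the inner while loop of B: mark flags[k] from k upwards while the line continues the block
def pvMarkB (lines : List String) (d : Nat) (k : Nat) (flags : List Bool) : List Bool :=
  if k < lines.length then
    if pvContB d (lines.getD k "") then pvMarkB lines d (k + 1) (flags.set k true) else flags
  else flags
termination_by lines.length - k

def fix_assignments_alt (lines : List String) : List String :=
  let flags := (List.range lines.length).foldl
    (fun flags j =>
      if pvTrigB (lines.getD j "") then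
        pvMarkB lines (PySem.Str.count (lines.getD j "") "\t") (j + 1) flags
      else flags)
    (List.replicate lines.length false)
  (lines.zip flags).map (fun p =>
    if PySem.Str.isIn "#" p.1 && p.2 then PySem.Str.replace p.1 "# " "" else p.1)

-- ===== PRECONDITION & SPEC =====
def Spec_fix_assignments (lines : List String) (out : List String) : Prop := out = fix_assignments_alt lines
instance (lines : List String) (out : List String) : Decidable (Spec_fix_assignments lines out) := by unfold Spec_fix_assignments; infer_instance

-- ===== CLAIM (what is proved, stated in full; the proofs are below) =====
def Claim_equal_fix_assignments : Prop := ∀ (lines : List String), Dom_fix_assignments lines → Spec_fix_assignments lines (fix_assignments lines)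

-- ===== LEMMAS AND PROOFS =====

-- proof-layer vocabulary: line i terminates a block of indent d
def pvTerm (L : List String) (d i : Nat) : Prop :=
  PySem.Str.count (L.getD i "") "\t" ≤ d ∧ PySem.Str.strip (L.getD i "") ≠ ""

-- trigger j's block is still open at every k in (j, i]
def pvCovers (L : List String) (j i : Nat) : Prop :=
  pvTrigB (L.getD j "") = true ∧
    ∀ k < i + 1, j < k → ¬ pvTerm L (PySem.Str.count (L.getD j "") "\t") k

-- line i lies inside some block
def pvFlag (L : List String) (i : Nat) : Prop := ∃ j < i, pvCovers L j i

-- Bool form of pvTerm / pvFlag, so that pvOut is computable without extra instances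
def pvTermb (L : List String) (d i : Nat) : Bool :=
  decide (PySem.Str.count (L.getD i "") "\t" ≤ d) && decide (PySem.Str.strip (L.getD i "") ≠ "")

def pvFlagb (L : List String) (i : Nat) : Bool :=
  (List.range i).any fun j =>
    pvTrigB (L.getD j "") &&
      (List.range (i + 1)).all fun k =>
        if j < k then !(pvTermb L (PySem.Str.count (L.getD j "") "\t") k) else true

theorem pvFlagb_iff (L : List String) (i : Nat) : pvFlagb L i = true ↔ pvFlag L i := by
  simp only [pvFlagb, pvFlag, pvCovers, pvTermb, pvTerm, List.any_eq_true, List.mem_range,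
    Bool.and_eq_true, List.all_eq_true]
  constructor
  · rintro ⟨j, hj, ht, hall⟩
    refine ⟨j, hj, ht, fun k hk hjk => ?_⟩
    have := hall k hk
    simp only [hjk, if_true, Bool.not_eq_true', Bool.and_eq_false_iff, decide_eq_false_iff_not,
      not_le, not_not] at this
    rintro ⟨hle, hne⟩
    rcases this with h | h
    · omega
    · exact hne h
  · rintro ⟨j, hj, ht, hall⟩
    refine ⟨j, hj, ht, fun k hk => ?_⟩
    by_cases hjk : j < k
    · have := hall k hk hjk
      simp only [hjk, if_true, Bool.not_eq_true', Bool.and_eq_false_iff, decide_eq_false_iff_not,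
        not_le, not_not]
      by_cases hle : PySem.Str.count (L.getD k "") "\t" ≤ PySem.Str.count (L.getD j "") "\t"
      · by_cases hne : PySem.Str.strip (L.getD k "") = ""
        · exact Or.inr hne
        · exact absurd ⟨hle, hne⟩ this
      · exact Or.inl (by omega)
    · simp [hjk]

-- the intended value of output line i
def pvOut (L : List String) (i : Nat) : String :=
  if PySem.Str.isIn "#" (L.getD i "") && pvFlagb L i then
    PySem.Str.replace (L.getD i "") "# " "" else L.getD i ""

-- no block from before s reaches s or beyond
def pvNF (L : List String) (s : Nat) : Prop :=
  ∀ i, s ≤ i → pvFlag L i → ∃ j, s ≤ j ∧ j < i ∧ pvCovers L j i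

theorem pv_trig_strip_ne (l : String) (h : pvTrigB l = true) :
    PySem.Str.strip l ≠ "" := by
  have hb : 'b' ∈ l.toList := by
    simp only [pvTrigB, Bool.or_eq_true] at h
    rcases h with h | h <;>
      exact ((PySem.Str.isIn_iff_infix _ _).mp h).subset (by decide)
  intro hs
  have h0 : PySem.Chars.strip l.toList = [] := by
    rw [← PySem.Str.toList_strip, hs]
    rfl
  have h1 : l.toList.dropWhile PySem.Chars.isspace ≠ [] := by
    rw [Ne, List.dropWhile_eq_nil_iff]
    intro h'
    exact absurd (h' 'b' hb) (by decide)
  have h2 : ((l.toList.dropWhile PySem.Chars.isspace).reverse.dropWhile PySem.Chars.isspace)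
      = [] := by
    simpa [PySem.Chars.strip, PySem.Chars.lstrip, PySem.Chars.rstrip] using h0
  rw [List.dropWhile_eq_nil_iff] at h2
  have hh := List.head_dropWhile_not PySem.Chars.isspace h1
  have := h2 _ (List.mem_reverse.mpr (List.head_mem h1))
  rw [hh] at this
  exact Bool.false_ne_true this

theorem pv_contB_iff (L : List String) (d k : Nat) :
    pvContB d (L.getD k "") = true ↔ ¬ pvTerm L d k := by
  simp only [pvContB, pvTerm, Bool.or_eq_true, decide_eq_true_eq]
  constructor
  · rintro (h | h) ⟨h1, h2⟩
    · omega
    · exact h2 h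
  · intro h
    by_cases hle : PySem.Str.count (L.getD k "") "\t" ≤ d
    · by_cases hne : PySem.Str.strip (L.getD k "") = ""
      · exact Or.inr hne
      · exact absurd ⟨hle, hne⟩ h
    · exact Or.inl (by omega)

theorem pv_termA_iff (L : List String) (d k : Nat) :
    (PySem.Str.count (L.getD k "") "\t" ≤ d ∧ PySem.Str.len (PySem.Str.strip (L.getD k "")) > 0)
      ↔ pvTerm L d k := by
  unfold pvTerm
  have : PySem.Str.len (PySem.Str.strip (L.getD k "")) > 0 ↔
      PySem.Str.strip (L.getD k "") ≠ "" := by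
    rw [PySem.Str.len_eq, Ne, ← String.toList_eq_nil_iff, ← List.length_eq_zero_iff]
    omega
  rw [this]

theorem pvMarkB_length (L : List String) (d k : Nat) (f : List Bool) :
    (pvMarkB L d k f).length = f.length := by
  fun_induction pvMarkB L d k f with
  | case1 k f hk hc ih => simpa using ih
  | case2 k f hk hc => rfl
  | case3 k f hk => rfl

theorem pvMarkB_getD (L : List String) (d : Nat) : ∀ n k (f : List Bool),
    L.length - k ≤ n → f.length = L.length → ∀ i,
    ((pvMarkB L d k f).getD i false = true ↔
      f.getD i false = true ∨
        (k ≤ i ∧ i < L.length ∧ ∀ m, k ≤ m → m ≤ i → pvContB d (L.getD m "") = true)) := by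
  intro n
  induction n with
  | zero =>
    intro k f hn hf i
    have hk : ¬ k < L.length := by omega
    rw [pvMarkB, if_neg hk]
    constructor
    · exact Or.inl
    · rintro (h | ⟨h1, h2, _⟩)
      · exact h
      · omega
  | succ n ih =>
    intro k f hn hf i
    by_cases hk : k < L.length
    · by_cases hc : pvContB d (L.getD k "") = true
      · rw [pvMarkB, if_pos hk, if_pos hc,
          ih (k + 1) (f.set k true) (by omega) (by simpa using hf) i]
        have hkf : k < f.length := by omega
        constructor
        · rintro (h | ⟨h1, h2, h3⟩)
          · by_cases hik : i = k
            · subst hik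
              refine Or.inr ⟨le_refl i, hk, fun m hm1 hm2 => ?_⟩
              have : m = i := by omega
              subst this
              exact hc
            · rw [List.getD_eq_getElem?_getD, List.getElem?_set_ne (fun h' => hik h'.symm),
                ← List.getD_eq_getElem?_getD] at h
              exact Or.inl h
          · refine Or.inr ⟨by omega, h2, fun m hm1 hm2 => ?_⟩
            by_cases hmk : m = k
            · subst hmk; exact hc
            · exact h3 m (by omega) hm2
        · rintro (h | ⟨h1, h2, h3⟩)
          · by_cases hik : i = k
            · subst hik
              refine Or.inl ?_
              rw [List.getD_eq_getElem?_getD, List.getElem?_set_self hkf]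
              rfl
            · refine Or.inl ?_
              rw [List.getD_eq_getElem?_getD, List.getElem?_set_ne (fun h' => hik h'.symm),
                ← List.getD_eq_getElem?_getD]
              exact h
          · by_cases hik : i = k
            · subst hik
              refine Or.inl ?_
              rw [List.getD_eq_getElem?_getD, List.getElem?_set_self hkf]
              rfl
            · exact Or.inr ⟨by omega, h2, fun m hm1 hm2 => h3 m (by omega) hm2⟩
      · rw [pvMarkB, if_pos hk, if_neg hc]
        constructor
        · exact Or.inl
        · rintro (h | ⟨h1, h2, h3⟩)
          · exact h
          · exact absurd (h3 k (le_refl k) h1) hc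
    · rw [pvMarkB, if_neg hk]
      constructor
      · exact Or.inl
      · rintro (h | ⟨h1, h2, _⟩)
        · exact h
        · omega

theorem pv_fold_len (L : List String) (m : Nat) (f : List Bool) :
    ((List.range m).foldl
      (fun flags j =>
        if pvTrigB (L.getD j "") then
          pvMarkB L (PySem.Str.count (L.getD j "") "\t") (j + 1) flags
        else flags) f).length = f.length := by
  induction m with
  | zero => rfl
  | succ m ih =>
    rw [List.range_succ, List.foldl_append, List.foldl_cons, List.foldl_nil]
    split
    · rw [pvMarkB_length, ih]
    · exact ih

theorem pv_fold_getD (L : List String) (m : Nat) (f : List Bool)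
    (hf : f.length = L.length) (i : Nat) :
    (((List.range m).foldl
      (fun flags j =>
        if pvTrigB (L.getD j "") then
          pvMarkB L (PySem.Str.count (L.getD j "") "\t") (j + 1) flags
        else flags) f).getD i false = true ↔
      f.getD i false = true ∨
        ∃ j < m, pvTrigB (L.getD j "") = true ∧ j + 1 ≤ i ∧ i < L.length ∧
          ∀ k, j + 1 ≤ k → k ≤ i → pvContB (PySem.Str.count (L.getD j "") "\t") (L.getD k "") = true) := by
  induction m with
  | zero => simp
  | succ m ih =>
    rw [List.range_succ, List.foldl_append, List.foldl_cons, List.foldl_nil]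
    have hg : ((List.range m).foldl
      (fun flags j =>
        if pvTrigB (L.getD j "") then
          pvMarkB L (PySem.Str.count (L.getD j "") "\t") (j + 1) flags
        else flags) f).length = L.length := by rw [pv_fold_len, hf]
    by_cases ht : pvTrigB (L.getD m "") = true
    · rw [if_pos ht,
        pvMarkB_getD L (PySem.Str.count (L.getD m "") "\t") (L.length - (m + 1)) (m + 1) _
          (by omega) hg i, ih]
      constructor
      · rintro ((h | ⟨j, hj, hc⟩) | ⟨h1, h2, h3⟩)
        · exact Or.inl h
        · exact Or.inr ⟨j, by omega, hc⟩
        · exact Or.inr ⟨m, by omega, ht, h1, h2, h3⟩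
      · rintro (h | ⟨j, hj, htj, hji, hi, hall⟩)
        · exact Or.inl (Or.inl h)
        · by_cases hjm : j = m
          · subst hjm
            exact Or.inr ⟨hji, hi, hall⟩
          · exact Or.inl (Or.inr ⟨j, by omega, htj, hji, hi, hall⟩)
    · rw [if_neg ht, ih]
      constructor
      · rintro (h | ⟨j, hj, hc⟩)
        · exact Or.inl h
        · exact Or.inr ⟨j, by omega, hc⟩
      · rintro (h | ⟨j, hj, htj, hc⟩)
        · exact Or.inl h
        · by_cases hjm : j = m
          · subst hjm; exact absurd htj ht
          · exact Or.inr ⟨j, by omega, htj, hc⟩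

theorem pv_flags_getD (L : List String) (i : Nat) (hi : i < L.length) :
    (((List.range L.length).foldl
      (fun flags j =>
        if pvTrigB (L.getD j "") then
          pvMarkB L (PySem.Str.count (L.getD j "") "\t") (j + 1) flags
        else flags) (List.replicate L.length false)).getD i false) = pvFlagb L i := by
  rw [Bool.eq_iff_iff, pvFlagb_iff]
  rw [pv_fold_getD L L.length _ (by simp) i]
  simp only [List.getD_eq_getElem?_getD, List.getElem?_replicate]
  constructor
  · rintro (h | ⟨j, _, htj, hji, _, hall⟩)
    · split at h <;> simp_all
    · refine ⟨j, by omega, htj, fun k hk hjk => ?_⟩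
      exact (pv_contB_iff L _ k).mp (hall k (by omega) (by omega))
  · rintro ⟨j, hj, htj, hall⟩
    refine Or.inr ⟨j, by omega, htj, by omega, hi, fun k hk1 hk2 => ?_⟩
    exact (pv_contB_iff L _ k).mpr (hall k (by omega) (by omega))

theorem pv_alt_eq (L : List String) :
    fix_assignments_alt L = (List.range L.length).map (pvOut L) := by
  unfold fix_assignments_alt
  apply List.ext_getElem
  · rw [List.length_map, List.length_zip, pv_fold_len, List.length_replicate,
      List.length_map, List.length_range]
    exact min_self _
  · intro i h1 h2
    have hi : i < L.length := by simpa using h2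
    have hfl : i < (((List.range L.length).foldl
      (fun flags j =>
        if pvTrigB (L.getD j "") then
          pvMarkB L (PySem.Str.count (L.getD j "") "\t") (j + 1) flags
        else flags) (List.replicate L.length false))).length := by
      rw [pv_fold_len, List.length_replicate]; exact hi
    have hflags := pv_flags_getD L i hi
    rw [List.getD_eq_getElem _ _ hfl] at hflags
    rw [List.getElem_map, List.getElem_map, List.getElem_zip, List.getElem_range]
    show (if PySem.Str.isIn "#" L[i] && _ then PySem.Str.replace L[i] "# " "" else L[i]) = _
    rw [pvOut, hflags, List.getD_eq_getElem L "" hi]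

theorem pv_goA_eq (L : List String) (n : Nat) : ∀ s, L.length - s ≤ n →
    (pvNF L s → pvGoA (L.drop s) = (List.range' s (L.length - s)).map (pvOut L)) ∧
    (∀ j₀, j₀ < s → pvTrigB (L.getD j₀ "") = true →
      (∀ k, j₀ < k → k < s → ¬ pvTerm L (PySem.Str.count (L.getD j₀ "") "\t") k) →
      pvNF L j₀ →
      (pvTakeBlockA (PySem.Str.count (L.getD j₀ "") "\t") (L.drop s)).1 ++
        pvGoA (pvTakeBlockA (PySem.Str.count (L.getD j₀ "") "\t") (L.drop s)).2 =
        (List.range' s (L.length - s)).map (pvOut L)) := by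
  induction n with
  | zero =>
    intro s hn
    have hs : L.length ≤ s := by omega
    have hd : L.drop s = [] := List.drop_eq_nil_of_le hs
    have hr : L.length - s = 0 := by omega
    constructor
    · intro _
      rw [hd, hr]
      simp [pvGoA]
    · intro j₀ _ _ _ _
      rw [hd, hr]
      simp [pvGoA, pvTakeBlockA]
  | succ n ih =>
    intro s hn
    by_cases hs : L.length ≤ s
    · have hd : L.drop s = [] := List.drop_eq_nil_of_le hs
      have hr : L.length - s = 0 := by omega
      refine ⟨fun _ => ?_, fun j₀ _ _ _ _ => ?_⟩ <;> rw [hd, hr] <;>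
        simp [pvGoA, pvTakeBlockA]
    · have hs' : s < L.length := by omega
      have hdrop : L.drop s = L[s] :: L.drop (s + 1) := List.drop_eq_getElem_cons hs'
      have hrange : List.range' s (L.length - s) =
          s :: List.range' (s + 1) (L.length - (s + 1)) := by
        have h : L.length - s = (L.length - (s + 1)) + 1 := by omega
        rw [h, List.range'_succ]
      have getDs : L.getD s "" = L[s] := List.getD_eq_getElem L "" hs'
      have hP : pvNF L s → pvGoA (L.drop s) = (List.range' s (L.length - s)).map (pvOut L) := by
        intro hNF
        have hnotflag : pvFlagb L s = false := by
          rw [← Bool.not_eq_true, pvFlagb_iff]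
          intro hf
          obtain ⟨j, hj1, hj2, _⟩ := hNF s (le_refl s) hf
          omega
        have hout : pvOut L s = L[s] := by
          rw [pvOut, hnotflag, Bool.and_false, if_neg Bool.false_ne_true, getDs]
        rw [hdrop, hrange, pvGoA]
        by_cases htrig : PySem.Str.isIn "else_body()" L[s] = true ∨
            PySem.Str.isIn "if_body()" L[s] = true
        · rw [if_pos htrig]
          have htB : pvTrigB (L.getD s "") = true := by
            rw [getDs, pvTrigB, Bool.or_eq_true]
            exact htrig
          have hQs := (ih (s + 1) (by omega)).2 s (by omega) htB
            (fun k hk1 hk2 => absurd hk2 (by omega)) hNF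
          rw [getDs] at hQs
          rw [List.map_cons, hout, hQs]
        · rw [if_neg htrig]
          have hNF' : pvNF L (s + 1) := by
            intro i hi hf
            obtain ⟨j, hj1, hj2, hcov⟩ := hNF i (by omega) hf
            have hjs : j ≠ s := by
              intro he
              subst he
              have := hcov.1
              rw [getDs, pvTrigB, Bool.or_eq_true] at this
              exact htrig this
            exact ⟨j, by omega, hj2, hcov⟩
          rw [List.map_cons, hout, (ih (s + 1) (by omega)).1 hNF']
      refine ⟨hP, ?_⟩
      intro j₀ hj₀ htrigj hopen hNFj
      by_cases hterm : pvTerm L (PySem.Str.count (L.getD j₀ "") "\t") s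
      · have hcond : PySem.Str.count L[s] "	" ≤ PySem.Str.count (L.getD j₀ "") "\t" ∧
            PySem.Str.len (PySem.Str.strip L[s]) > 0 := by
          have := (pv_termA_iff L (PySem.Str.count (L.getD j₀ "") "\t") s).mpr hterm
          rwa [getDs] at this
        rw [hdrop, pvTakeBlockA, if_pos hcond, List.nil_append, ← hdrop]
        have hNFs : pvNF L s := by
          intro i hi hf
          obtain ⟨j, hjj₀, hji, hcov⟩ := hNFj i (by omega) hf
          refine ⟨j, ?_, hji, hcov⟩
          by_contra hjs
          push Not at hjs
          rcases Nat.lt_or_ge j₀ j with hj2 | hj2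
          · have hnt := hopen j hj2 hjs
            have hstrip := pv_trig_strip_ne _ hcov.1
            have hgt : PySem.Str.count (L.getD j₀ "") "\t" <
                PySem.Str.count (L.getD j "") "\t" := by
              by_contra hle
              exact hnt ⟨by omega, hstrip⟩
            have hts := hterm.1
            exact hcov.2 s (by omega) (by omega) ⟨by omega, hterm.2⟩
          · have hje : j = j₀ := by omega
            subst hje
            exact hcov.2 s (by omega) (by omega) hterm
        exact hP hNFs
      · have hcond : ¬ (PySem.Str.count L[s] "	" ≤ PySem.Str.count (L.getD j₀ "") "\t" ∧
            PySem.Str.len (PySem.Str.strip L[s]) > 0) := by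
          rw [show L[s] = L.getD s "" from getDs.symm]
          exact fun h => hterm ((pv_termA_iff L _ s).mp h)
        have hflag : pvFlag L s := by
          refine ⟨j₀, hj₀, htrigj, fun k hk1 hk2 => ?_⟩
          by_cases hks : k = s
          · subst hks
            exact hterm
          · exact hopen k hk2 (by omega)
        have hfb : pvFlagb L s = true := (pvFlagb_iff L s).mpr hflag
        have hout : pvOut L s =
            (if PySem.Str.isIn "#" L[s] then PySem.Str.replace L[s] "# " "" else L[s]) := by
          rw [pvOut, hfb, Bool.and_true, getDs]
        rw [hdrop, pvTakeBlockA, if_neg hcond, List.cons_append, hrange, List.map_cons, hout]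
        refine congrArg _ ?_
        have hopen' : ∀ k, j₀ < k → k < s + 1 →
            ¬ pvTerm L (PySem.Str.count (L.getD j₀ "") "\t") k := by
          intro k hk1 hk2
          by_cases hks : k = s
          · subst hks
            exact hterm
          · exact hopen k hk1 (by omega)
        exact (ih (s + 1) (by omega)).2 j₀ (by omega) htrigj hopen' hNFj

-- ===== VERDICT (by name: the statement is the Claim_ definition above) =====
theorem fix_assignments_spec : Claim_equal_fix_assignments := by
  intro L _
  unfold Spec_fix_assignments fix_assignments
  have h0 : pvNF L 0 := by
    intro i _ hf
    obtain ⟨j, hj, hc⟩ := hf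
    exact ⟨j, Nat.zero_le _, hj, hc⟩
  have := (pv_goA_eq L L.length 0 (by omega)).1 h0
  simpa [pv_alt_eq, List.range_eq_range'] using this
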